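-- pv_equiv track=rewrite | github.com/REX51/competitive-programming | hackerearth/gridphrase.py | vertical_mat
-- ===== SOURCE A (Python) =====
-- def vertical_mat(l,p):
--     vertical = []
--     count = 0
--     s = 'saba'
--     for i in l:
--         j = list(i)
--         vertical.append(j[p])
--     vertical = ''.join(vertical)
--     count += vertical.count(s)
--     return count
-- ===== SOURCE B (Python) =====
-- def vertical_mat(l, p):
--     count = 0
--     w = ""
--     for row in l:
--         w = (w + row[p])[-4:]
--         if w == "saba":
--             count += 1
--     return count
-- ===== Notes on version B (the rewrite author's own statement) =====
-- stated objective: simpler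
-- what changed: B never builds the joined column string: it streams over the rows once, keeping only the last up-to-4 column characters in a rolling window and counting the window hits, instead of materialising the column and running str.count over it.
import Mathlib
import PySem

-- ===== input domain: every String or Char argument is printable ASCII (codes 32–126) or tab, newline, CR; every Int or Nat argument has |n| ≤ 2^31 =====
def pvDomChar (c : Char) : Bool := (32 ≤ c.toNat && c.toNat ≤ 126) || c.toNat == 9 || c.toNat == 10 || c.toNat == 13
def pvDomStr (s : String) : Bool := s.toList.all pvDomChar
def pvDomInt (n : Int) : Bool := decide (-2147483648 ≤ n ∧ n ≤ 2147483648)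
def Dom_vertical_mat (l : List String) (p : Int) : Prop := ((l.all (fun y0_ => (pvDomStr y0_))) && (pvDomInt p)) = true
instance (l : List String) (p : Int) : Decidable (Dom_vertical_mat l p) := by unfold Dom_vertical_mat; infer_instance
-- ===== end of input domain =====

-- B streams over the rows with a rolling last-4-characters window instead of building the joined column string; same count.

-- ===== PORT A =====
-- j[p] raises IndexError for an out-of-range index; Pre_ excludes that, so the port reads the char with a default.
def vertical_mat (l : List String) (p : Int) : Int :=
  let vertical : List Char :=
    l.foldl (fun v (i : String) =>
      let j := i.toList
      v ++ [(PySem.List.pyGet? j p).getD ' ']) []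
  let s := "saba"
  ((0 : Int) + (PySem.Str.count (String.ofList vertical) s : Int))

-- ===== PORT B =====
def vertical_mat_alt (l : List String) (p : Int) : Int :=
  (l.foldl (fun (st : Int × List Char) (row : String) =>
      let w := PySem.List.slice (st.2 ++ [(PySem.List.pyGet? row.toList p).getD ' ']) (some (-4)) none
      let count := if w = "saba".toList then st.1 + 1 else st.1
      (count, w)) ((0 : Int), ([] : List Char))).1

-- ===== PRECONDITION & SPEC =====
-- Pre_ is exactly where the Python A returns: every row must have the index p in Python range (else row[p] raises IndexError).
def Pre_vertical_mat (l : List String) (p : Int) : Prop :=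
  ∀ s ∈ l, -(s.length : Int) ≤ p ∧ p < (s.length : Int)
instance (l : List String) (p : Int) : Decidable (Pre_vertical_mat l p) := by unfold Pre_vertical_mat; infer_instance

def pvWitness_vertical_mat : List String × Int := (["sx", "ay", "bz", "aw"], 0)

def Spec_vertical_mat (l : List String) (p : Int) (out : Int) : Prop := out = vertical_mat_alt l p
instance (l : List String) (p : Int) (out : Int) : Decidable (Spec_vertical_mat l p out) := by unfold Spec_vertical_mat; infer_instance

-- ===== CLAIM (what is proved, stated in full; the proofs are below) =====
def Claim_equal_vertical_mat : Prop := ∀ (l : List String) (p : Int), Dom_vertical_mat l p → Pre_vertical_mat l p → Spec_vertical_mat l p (vertical_mat l p)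

-- ===== LEMMAS AND PROOFS =====

def pvSaba : List Char := ['s', 'a', 'b', 'a']

def pvOcc : List Char → Nat
  | [] => 0
  | c :: cs => (if pvSaba <+: c :: cs then 1 else 0) + pvOcc cs

lemma pvGo (fuel : Nat) : ∀ (l : List Char) (acc : Nat), l.length ≤ fuel →
    PySem.Chars.count.go pvSaba fuel l acc = acc + pvOcc l := by
  induction fuel with
  | zero =>
    intro l acc h
    have : l = [] := by cases l <;> simp_all
    subst this; simp [PySem.Chars.count.go, pvOcc]
  | succ f ih =>
    intro l acc h
    cases l with
    | nil => simp [PySem.Chars.count.go, pvOcc]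
    | cons c t =>
      rw [PySem.Chars.count.go]
      by_cases hp : pvSaba.isPrefixOf (c :: t)
      · simp only [hp, if_true]
        obtain ⟨r, hr⟩ := List.isPrefixOf_iff_prefix.mp hp
        rw [← hr] at h ⊢
        have hlen : r.length ≤ f := by simp [pvSaba] at h; omega
        rw [show (pvSaba ++ r).drop pvSaba.length = r by simp]
        rw [ih r (acc + 1) hlen]
        have h1 : pvOcc (pvSaba ++ r) = 1 + pvOcc r := by
          simp [pvSaba, pvOcc, List.cons_prefix_cons]
        rw [h1]; omega
      · simp only [hp]
        rw [ih t acc (by simpa using Nat.le_of_succ_le_succ h)]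
        have : ¬ (pvSaba <+: c :: t) := fun hc => hp (List.isPrefixOf_iff_prefix.mpr hc)
        simp [pvOcc, this]

lemma pvCount (cs : List Char) : PySem.Chars.count cs pvSaba = pvOcc cs := by
  rw [show PySem.Chars.count cs pvSaba =
      PySem.Chars.count.go pvSaba cs.length cs 0 from by rfl]
  simpa using pvGo cs.length cs 0 le_rfl

lemma pvNoPre {w : List Char} (h : w.length < 4) : ¬ pvSaba <+: w := by
  intro hp; have := hp.length_le; simp [pvSaba] at this; omega

lemma pvNoSuf {w : List Char} (h : w.length < 4) : ¬ pvSaba <:+ w := by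
  intro hp; have := hp.length_le; simp [pvSaba] at this; omega

lemma pvPreSnoc {w : List Char} (c : Char) (h : 4 ≤ w.length) :
    (pvSaba <+: w ++ [c]) ↔ (pvSaba <+: w) := by
  rw [List.prefix_iff_eq_take, List.prefix_iff_eq_take,
    List.take_append_of_le_length (by simpa [pvSaba] using h)]

lemma pvSufCons {x : Char} {w : List Char} (h : 4 ≤ w.length) :
    (pvSaba <:+ x :: w) ↔ (pvSaba <:+ w) := by
  rw [List.suffix_cons_iff]
  constructor
  · rintro (he | hs)
    · exfalso; have : pvSaba.length = (x :: w).length := by rw [he]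
      simp [pvSaba] at this; omega
    · exact hs
  · exact Or.inr

lemma pvEq4Pre {w : List Char} (h : w.length = 4) : (pvSaba <+: w) ↔ w = pvSaba := by
  constructor
  · intro hp; exact (hp.eq_of_length (by simp [pvSaba, h])).symm
  · rintro rfl; exact List.prefix_refl _

lemma pvEq4Suf {w : List Char} (h : w.length = 4) : (pvSaba <:+ w) ↔ w = pvSaba := by
  constructor
  · intro hp; exact (hp.eq_of_length (by simp [pvSaba, h])).symm
  · rintro rfl; exact List.suffix_refl _

lemma pvOccSnoc (v : List Char) (c : Char) :
    pvOcc (v ++ [c]) = pvOcc v + (if pvSaba <:+ v ++ [c] then 1 else 0) := by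
  induction v with
  | nil =>
    simp [pvOcc, pvNoPre (w := [c]) (by simp), pvNoSuf (w := [c]) (by simp)]
  | cons x xs ih =>
    rw [List.cons_append]
    rw [show pvOcc (x :: (xs ++ [c])) =
      (if pvSaba <+: x :: (xs ++ [c]) then 1 else 0) + pvOcc (xs ++ [c]) from rfl]
    rw [show pvOcc (x :: xs) =
      (if pvSaba <+: x :: xs then 1 else 0) + pvOcc xs from rfl]
    rw [ih]
    rcases Nat.lt_or_ge xs.length 3 with hlt | hge
    · have hp1 : ¬ pvSaba <+: x :: xs := pvNoPre (by simp; omega)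
      have hs1 : ¬ pvSaba <:+ xs ++ [c] := pvNoSuf (by simp; omega)
      rcases Nat.lt_or_ge xs.length 2 with h2 | h2
      · have hi : ¬ pvSaba <+: x :: (xs ++ [c]) := pvNoPre (by simp; omega)
        have hs2 : ¬ pvSaba <:+ x :: (xs ++ [c]) := pvNoSuf (by simp; omega)
        simp [hp1, hs1, hi, hs2]
      · have hlen : (x :: (xs ++ [c])).length = 4 := by simp; omega
        have e1 : (pvSaba <+: x :: (xs ++ [c])) ↔ (pvSaba <:+ x :: (xs ++ [c])) :=
          (pvEq4Pre hlen).trans (pvEq4Suf hlen).symm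
        simp only [e1, hp1, hs1]
        omega
    · have h4 : 4 ≤ (x :: xs).length := by simp; omega
      have h4' : 4 ≤ (xs ++ [c]).length := by simp; omega
      have e1 : (pvSaba <+: x :: (xs ++ [c])) ↔ pvSaba <+: x :: xs := by
        rw [← List.cons_append]; exact pvPreSnoc c h4
      have e2 : (pvSaba <:+ x :: (xs ++ [c])) ↔ pvSaba <:+ xs ++ [c] := pvSufCons h4'
      simp only [e1, e2]; omega

def pvLast4 (w : List Char) : List Char := w.drop (w.length - 4)

lemma pvSlice4 (w : List Char) : PySem.List.slice w (some (-4)) none = pvLast4 w := by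
  rw [PySem.List.slice_from_neg_ofNat w 4 (by norm_num)]; rfl

lemma pvLast4SnocDrop (w : List Char) (c : Char) :
    (pvLast4 w ++ [c]).drop ((pvLast4 w ++ [c]).length - 4) = (w ++ [c]).drop ((w ++ [c]).length - 4) := by
  unfold pvLast4
  have h1 : (List.drop (w.length - 4) w ++ [c]).length - 4 ≤ (List.drop (w.length - 4) w).length := by
    simp only [List.length_append, List.length_drop, List.length_singleton]; omega
  have h2 : (w ++ [c]).length - 4 ≤ w.length := by
    simp only [List.length_append, List.length_singleton]; omega
  rw [List.drop_append_of_le_length h1, List.drop_append_of_le_length h2, List.drop_drop]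
  congr 2
  simp
  omega

lemma pvLast4Snoc (w : List Char) (c : Char) :
    pvLast4 (pvLast4 w ++ [c]) = pvLast4 (w ++ [c]) := pvLast4SnocDrop w c

lemma pvSufIffDrop (u : List Char) : (pvSaba <:+ u) ↔ pvSaba = u.drop (u.length - 4) := by
  rw [List.suffix_iff_eq_drop]; rw [show pvSaba.length = 4 from rfl]

lemma pvWinEq (w : List Char) (c : Char) :
    (pvLast4 (w ++ [c]) = pvSaba) ↔ (pvSaba <:+ w ++ [c]) := by
  rw [pvSufIffDrop]; unfold pvLast4; exact eq_comm

def pvStep (st : Int × List Char) (c : Char) : Int × List Char :=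
  let w := PySem.List.slice (st.2 ++ [c]) (some (-4)) none
  let count := if w = "saba".toList then st.1 + 1 else st.1
  (count, w)

lemma pvSabaToList : "saba".toList = pvSaba := by decide

lemma pvFoldRun : ∀ (cs : List Char) (u : List Char) (n : Int),
    (cs.foldl pvStep (n, pvLast4 u)).1 = n + (pvOcc (u ++ cs) : Int) - (pvOcc u : Int) := by
  intro cs
  induction cs with
  | nil => intro u n; simp
  | cons c cs ih =>
    intro u n
    rw [List.foldl_cons]
    have hw : pvStep (n, pvLast4 u) c =
        (if pvSaba <:+ u ++ [c] then n + 1 else n, pvLast4 (u ++ [c])) := by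
      unfold pvStep
      rw [pvSlice4, pvLast4Snoc, pvSabaToList]
      simp only [pvWinEq]
    rw [hw, ih (u ++ [c])]
    rw [pvOccSnoc u c, List.append_assoc]
    by_cases h : pvSaba <:+ u ++ [c]
    · simp [h]; ring
    · simp [h]

lemma pvCountOfList (cs : List Char) :
    (PySem.Str.count (String.ofList cs) "saba") = pvOcc cs := by
  simp [PySem.Str.count, pvSabaToList, pvCount]

lemma pvA (l : List String) (p : Int) :
    vertical_mat l p =
      (pvOcc (l.map (fun i => (PySem.List.pyGet? i.toList p).getD ' ')) : Int) := by
  show (0 : Int) + (PySem.Str.count (String.ofList (List.foldl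
      (fun v i => v ++ [(PySem.List.pyGet? i.toList p).getD ' ']) [] l)) "saba" : Int) = _
  have h1 : List.foldl (fun (v : List Char) (i : String) =>
        v ++ [(PySem.List.pyGet? i.toList p).getD ' ']) [] l
      = List.map (fun i : String => (PySem.List.pyGet? i.toList p).getD ' ') l := by
    simpa using PySem.List.foldl_append_singleton_eq_map
      (fun i : String => (PySem.List.pyGet? i.toList p).getD ' ') l []
  rw [h1, pvCountOfList]
  omega

lemma pvB (l : List String) (p : Int) :
    vertical_mat_alt l p =
      (pvOcc (l.map (fun i => (PySem.List.pyGet? i.toList p).getD ' ')) : Int) := by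
  show (List.foldl (fun st row => pvStep st ((PySem.List.pyGet? row.toList p).getD ' '))
      ((0 : Int), ([] : List Char)) l).1 = _
  rw [show List.foldl (fun st row => pvStep st ((PySem.List.pyGet? row.toList p).getD ' '))
        ((0 : Int), ([] : List Char)) l
      = List.foldl pvStep ((0 : Int), ([] : List Char))
          (l.map (fun i => (PySem.List.pyGet? i.toList p).getD ' ')) from
    List.foldl_map.symm]
  rw [show ((0 : Int), ([] : List Char)) = ((0 : Int), pvLast4 []) from rfl, pvFoldRun]
  simp [pvOcc]

theorem vertical_mat_spec : Claim_equal_vertical_mat := by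
  intro l p _ _
  unfold Spec_vertical_mat
  rw [pvA, pvB]
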